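-- pv_equiv track=rewrite | github.com/its-sachin/Codeforces | 765/C_Road_Optimization.py | a2
-- ===== SOURCE A (Python) =====
-- def a2(n,l,k,a,d):
--     d.append(l)
--     for i in range(n,0,-1):d[i] = d[i]-d[i-1]
--     d = d[1:]
--
--     dp = [[[0,0] for i in range(k+1)] for j in range(n+1)]
--     for i in range(1,n+1):
--         dp[i][0] = [a[i-1]*d[i-1] + dp[i-1][0][0],a[i-1]]
--     for i in range(1,k+1):
--         dp[1][i] = [dp[1][0][0],a[0]]
--
--     for i in range(2,n+1):
--         for j in range(1,k+1):
--             v1 = dp[i-1][j-1][0] + dp[i-1][j-1][1]*d[i-1]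
--             v2 = dp[i-1][j][0]+a[i-1]*d[i-1]
--             if(v1<=v2):dp[i][j] = [v1,dp[i-1][j-1][1]]
--             else:dp[i][j] = [v2,a[i-1]]
--     return min(dp[-1])[0]
-- ===== SOURCE B (Python) =====
-- def a2(n, l, k, a, d):
--     # Same in-place mutation of the caller's d as the original: append l, difference pass.
--     d.append(l)
--     for i in range(n, 0, -1):
--         d[i] = d[i] - d[i-1]
--     seg = d[1:]
--
--     # Top-down, demand-driven evaluation of the dp-cell recurrence:
--     # depth-first with an explicit stack, a memo dict and an 'expanded' set
--     # (a cell is pushed back once; when it resurfaces its dependencies are memoised).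
--     memo = {}
--     expanded = set()
--
--     def cell(i0, j0):
--         stack = [(i0, j0)]
--         while stack:
--             c = stack.pop()
--             if c in memo:
--                 continue
--             i, j = c
--             if i <= 0:
--                 memo[c] = (0, 0)
--             elif c in expanded:
--                 # all dependencies were resolved while c waited on the stack
--                 if j == 0:
--                     memo[c] = (a[i-1] * seg[i-1] + memo[(i-1, 0)][0], a[i-1])
--                 elif i == 1:
--                     memo[c] = (memo[(1, 0)][0], a[0])
--                 else:
--                     pc, ps = memo[(i-1, j-1)]
--                     v1 = pc + ps * seg[i-1]
--                     v2 = memo[(i-1, j)][0] + a[i-1] * seg[i-1]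
--                     memo[c] = (v1, ps) if v1 <= v2 else (v2, a[i-1])
--             else:
--                 expanded.add(c)
--                 stack.append(c)
--                 if j == 0:
--                     stack.append((i-1, 0))
--                 elif i == 1:
--                     stack.append((1, 0))
--                 else:
--                     stack.append((i-1, j))
--                     stack.append((i-1, j-1))
--         return memo[(i0, j0)]
--
--     best = None
--     for j in range(k + 1):
--         v = cell(n, j)
--         if best is None or v < best:
--             best = v
--     return best[0]
-- ===== Notes on version B (the rewrite author's own statement) =====
-- stated objective: alternative
-- what changed: B replaces A's bottom-up table fill (two seeding loops plus a nested i-by-j sweep over an (n+1)x(k+1) array, finished by min over the last row) with top-down demand-driven evaluation: each needed dp cell is resolved depth-first with an explicit stack, a memo dict and an 'expanded' set, and a running first-minimum over the k+1 goal cells replaces min(dp[-1]).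
import Mathlib
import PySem

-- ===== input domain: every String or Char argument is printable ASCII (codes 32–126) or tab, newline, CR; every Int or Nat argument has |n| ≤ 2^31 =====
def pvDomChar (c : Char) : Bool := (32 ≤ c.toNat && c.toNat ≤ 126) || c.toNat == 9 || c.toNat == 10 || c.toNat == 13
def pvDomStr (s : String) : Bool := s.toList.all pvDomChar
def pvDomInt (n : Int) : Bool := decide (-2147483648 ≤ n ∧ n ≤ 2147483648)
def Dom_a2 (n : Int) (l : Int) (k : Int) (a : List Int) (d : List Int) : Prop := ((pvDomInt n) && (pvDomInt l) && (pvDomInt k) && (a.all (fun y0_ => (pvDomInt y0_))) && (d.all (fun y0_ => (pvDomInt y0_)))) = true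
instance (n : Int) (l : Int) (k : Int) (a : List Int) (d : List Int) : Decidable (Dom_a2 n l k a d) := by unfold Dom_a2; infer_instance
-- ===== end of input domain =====

-- B evaluates A's dp-cell recurrence top-down (demand-driven, depth-first with an explicit
-- stack, a memo dict and an 'expanded' set, plus a running first-minimum over the k+1 goal
-- cells) instead of A's bottom-up table fill; B performs the same in-place mutation of the
-- caller's d (append l, difference pass) as A, so only return values are compared here.


-- ===== PORT A =====
-- The first two statements ('d.append(l)'; the in-place difference loop; then 'd = d[1:]')
-- are textually identical in A and in B (Source B), so both ports share this helper.
-- Indices i, i-1 in the loop are nonnegative and in range under Pre_a2, so set/getD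
-- with .toNat and default 0 are exact there.
def pvSeg (n : Int) (l : Int) (d : List Int) : List Int :=
  let d1 := d ++ [l]
  let d2 := (PySem.List.pyRange n 0 (-1)).foldl
    (fun dd i => dd.set i.toNat (dd.getD i.toNat 0 - dd.getD (i.toNat - 1) 0)) d1
  PySem.List.slice d2 (some 1) none

-- Python's '<' on the two-element tuples/lists (cost, speed) is lexicographic.
def pvLexLt (x y : Int × Int) : Bool := x.1 < y.1 || (x.1 == y.1 && x.2 < y.2)

-- min(row) keeping the first minimum; [] is unreachable under Pre_a2 (Python raises).
def pvMinRow (xs : List (Int × Int)) : Int × Int :=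
  match xs with
  | [] => (0, 0)
  | h :: t => t.foldl (fun m x => if pvLexLt x m then x else m) h

-- A's mutable 2D table dp, modelled as a cell-lookup function (all reads/writes are in
-- range under Pre_a2, where the model is exact).
structure PvTbl where
  get : Nat → Nat → Int × Int

def pvUpd (T : PvTbl) (i j : Nat) (v : Int × Int) : PvTbl :=
  ⟨fun i' j' => if i' = i ∧ j' = j then v else T.get i' j'⟩

-- loop body of 'for i in range(1,n+1): dp[i][0] = [a[i-1]*d[i-1] + dp[i-1][0][0], a[i-1]]'
def pvStep1 (a dd : List Int) (T : PvTbl) (i : Int) : PvTbl :=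
  pvUpd T i.toNat 0
    (a.getD (i.toNat - 1) 0 * dd.getD (i.toNat - 1) 0 + (T.get (i.toNat - 1) 0).1,
     a.getD (i.toNat - 1) 0)

-- loop body of 'for i in range(1,k+1): dp[1][i] = [dp[1][0][0], a[0]]'
def pvStep2 (a : List Int) (T : PvTbl) (i : Int) : PvTbl :=
  pvUpd T 1 i.toNat ((T.get 1 0).1, a.getD 0 0)

-- inner body of the nested loop 'for i in range(2,n+1): for j in range(1,k+1): …'
def pvStep3 (a dd : List Int) (i : Int) (T : PvTbl) (j : Int) : PvTbl :=
  let p := T.get (i.toNat - 1) (j.toNat - 1)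
  let v1 := p.1 + p.2 * dd.getD (i.toNat - 1) 0
  let v2 := (T.get (i.toNat - 1) j.toNat).1 + a.getD (i.toNat - 1) 0 * dd.getD (i.toNat - 1) 0
  if v1 ≤ v2 then pvUpd T i.toNat j.toNat (v1, p.2)
  else pvUpd T i.toNat j.toNat (v2, a.getD (i.toNat - 1) 0)

def a2 (n : Int) (l : Int) (k : Int) (a : List Int) (d : List Int) : Int :=
  let dd := pvSeg n l d
  let dp0 : PvTbl := ⟨fun _ _ => (0, 0)⟩
  let dp1 := (PySem.List.pyRange 1 (n + 1) 1).foldl (pvStep1 a dd) dp0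
  let dp2 := (PySem.List.pyRange 1 (k + 1) 1).foldl (pvStep2 a) dp1
  let dp3 := (PySem.List.pyRange 2 (n + 1) 1).foldl
    (fun T i => (PySem.List.pyRange 1 (k + 1) 1).foldl (pvStep3 a dd i) T) dp2
  -- 'return min(dp[-1])[0]': dp[-1] is row n, its k+1 entries enumerated in order
  (pvMinRow ((PySem.List.pyRange 0 (k + 1) 1).map (fun j => dp3.get n.toNat j.toNat))).1

-- ===== PORT B =====
-- Cells a run of B's cell loop can ever touch (inside Pre_a2: the rectangle 0..n x 0..k);
-- used as a guard making pvCell total and, as a Finset, for the termination measure.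
def pvInU (n k : Int) (c : Int × Int) : Bool :=
  (min 0 n ≤ c.1) && (c.1 ≤ max 0 n) && (0 ≤ c.2) && (c.2 ≤ k)

theorem pvInU_mem_Icc {n k : Int} {c : Int × Int} (h : pvInU n k c = true) :
    c ∈ Finset.Icc (min 0 n) (max 0 n) ×ˢ Finset.Icc 0 k := by
  simp only [pvInU, Bool.and_eq_true, decide_eq_true_eq] at h
  simp only [Finset.mem_product, Finset.mem_Icc]
  omega

-- the cells pushed by B's expansion branch ('stack.append' lines)
def pvKids (c : Int × Int) : List (Int × Int) :=
  if c.2 = 0 then [(c.1 - 1, 0)]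
  else if c.1 = 1 then [(1, 0)]
  else [(c.1 - 1, c.2 - 1), (c.1 - 1, c.2)]

theorem pvKids_mem_pvU (n k : Int) (c : Int × Int) (hc : pvInU n k c = true) (hi : 0 < c.1) :
    ∀ x ∈ pvKids c, pvInU n k x = true := by
  simp only [pvInU, Bool.and_eq_true, decide_eq_true_eq] at hc ⊢
  intro x hx
  simp only [pvKids] at hx
  split_ifs at hx <;> simp at hx <;>
    [skip; skip; rcases hx with rfl | rfl] <;> (try subst hx) <;> simp <;> omega

theorem pv_filter_card_lt {α : Type} [DecidableEq α] (U : Finset α) (p q : α → Prop)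
    [DecidablePred p] [DecidablePred q] (x : α) (hx : x ∈ U) (hpx : p x) (hqx : ¬ q x)
    (himp : ∀ y, q y → p y) : (U.filter q).card < (U.filter p).card := by
  apply Finset.card_lt_card
  constructor
  · exact Finset.monotone_filter_right _ (fun y _ hy => himp y hy)
  · intro hsub
    have := hsub (Finset.mem_filter.mpr ⟨hx, hpx⟩)
    exact hqx (Finset.mem_filter.mp this).2

-- B's inner 'while stack:' loop; state = (memo, expanded).  Python's memo[...] reads in
-- the expanded branch are ported as get?.getD (0,0): the key is present there under the
-- loop invariant proved below, so the default is never used on executed paths.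
def pvCellLoop (n k : Int) (a seg : List Int) :
    (stack : List (Int × Int)) → (∀ c ∈ stack, pvInU n k c = true) →
    PySem.Dict (Int × Int) (Int × Int) → PySem.Set (Int × Int) →
    PySem.Dict (Int × Int) (Int × Int) × PySem.Set (Int × Int)
  | [], _, m, e => (m, e)
  | c :: rest, hs, m, e =>
    if hm : (PySem.Dict.get? m c).isSome then
      pvCellLoop n k a seg rest (fun x hx => hs x (List.mem_cons_of_mem _ hx)) m e
    else if hi : c.1 ≤ 0 then
      pvCellLoop n k a seg rest (fun x hx => hs x (List.mem_cons_of_mem _ hx))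
        (m.insert c (0, 0)) e
    else if he : PySem.Set.contains e c then
      let i := c.1
      let j := c.2
      let val : Int × Int :=
        if j = 0 then
          (a.getD (i - 1).toNat 0 * seg.getD (i - 1).toNat 0 +
            ((PySem.Dict.get? m (i - 1, 0)).getD (0, 0)).1, a.getD (i - 1).toNat 0)
        else if i = 1 then
          (((PySem.Dict.get? m (1, 0)).getD (0, 0)).1, a.getD 0 0)
        else
          let p := (PySem.Dict.get? m (i - 1, j - 1)).getD (0, 0)
          let v1 := p.1 + p.2 * seg.getD (i - 1).toNat 0
          let v2 := ((PySem.Dict.get? m (i - 1, j)).getD (0, 0)).1 +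
            a.getD (i - 1).toNat 0 * seg.getD (i - 1).toNat 0
          if v1 ≤ v2 then (v1, p.2) else (v2, a.getD (i - 1).toNat 0)
      pvCellLoop n k a seg rest (fun x hx => hs x (List.mem_cons_of_mem _ hx))
        (m.insert c val) e
    else
      pvCellLoop n k a seg (pvKids c ++ c :: rest)
        (by
          intro x hx
          rcases List.mem_append.mp hx with h | h
          · exact pvKids_mem_pvU n k c (hs c (List.mem_cons_self)) (by omega) x h
          · exact hs x h)
        m (PySem.Set.add e c)
  termination_by stack _ m e =>
    (((Finset.Icc (min 0 n) (max 0 n) ×ˢ Finset.Icc 0 k).filter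
        (fun c => ¬ (PySem.Set.contains e c = true))).card,
     ((Finset.Icc (min 0 n) (max 0 n) ×ˢ Finset.Icc 0 k).filter
        (fun c => PySem.Dict.get? m c = none)).card,
     stack.length)
  decreasing_by
  · apply Prod.Lex.right
    apply Prod.Lex.right
    simp
  · apply Prod.Lex.right
    apply Prod.Lex.left
    apply pv_filter_card_lt _ _ _ c (pvInU_mem_Icc (hs c List.mem_cons_self))
    · simpa using hm
    · simp [PySem.Dict.get?_insert_self]
    · intro y hy
      by_cases hyc : y = c
      · subst hyc; simp [PySem.Dict.get?_insert_self] at hy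
      · rwa [PySem.Dict.get?_insert_of_ne _ _ hyc] at hy
  · apply Prod.Lex.right
    apply Prod.Lex.left
    apply pv_filter_card_lt _ _ _ c (pvInU_mem_Icc (hs c List.mem_cons_self))
    · simpa using hm
    · simp [PySem.Dict.get?_insert_self]
    · intro y hy
      by_cases hyc : y = c
      · subst hyc; simp [PySem.Dict.get?_insert_self] at hy
      · rwa [PySem.Dict.get?_insert_of_ne _ _ hyc] at hy
  · apply Prod.Lex.left
    apply pv_filter_card_lt _ _ _ c (pvInU_mem_Icc (hs c List.mem_cons_self))
    · simpa using he
    · simp [PySem.Set.mem_add]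
    · intro y hy hcon
      exact hy (by simp [PySem.Set.mem_add] at hcon ⊢; tauto)

-- one call 'cell(c)' of Source B; the dite guard only makes the call total (inside Pre_a2
-- every executed call has pvInU n k c, see a2_alt's fold below)
def pvCell (n k : Int) (a seg : List Int)
    (m : PySem.Dict (Int × Int) (Int × Int)) (e : PySem.Set (Int × Int)) (c : Int × Int) :
    PySem.Dict (Int × Int) (Int × Int) × PySem.Set (Int × Int) :=
  if h : pvInU n k c then
    pvCellLoop n k a seg [c] (by intro x hx; rw [List.mem_singleton] at hx; subst hx; exact h) m e
  else (m, e)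

def a2_alt (n : Int) (l : Int) (k : Int) (a : List Int) (d : List Int) : Int :=
  let seg := pvSeg n l d
  let st := (PySem.List.pyRange 0 (k + 1) 1).foldl
    (fun (st : PySem.Dict (Int × Int) (Int × Int) × PySem.Set (Int × Int) × Option (Int × Int)) j =>
      let r := pvCell n k a seg st.1 st.2.1 (n, j)
      -- 'return memo[(i0, j0)]' of cell: present under the loop invariant
      let v := (PySem.Dict.get? r.1 (n, j)).getD (0, 0)
      (r.1, r.2,
        match st.2.2 with
        | none => some v
        | some b => if pvLexLt v b then some v else some b))
    (PySem.Dict.empty, PySem.Set.empty, none)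
  -- 'return best[0]'; best is None only when k < 0 (outside Pre_a2, Python raises)
  ((st.2.2).getD (0, 0)).1

-- ===== PRECONDITION & SPEC =====
-- Pre_a2 = exactly the inputs where the Python A returns: it needs 0 ≤ n, 0 ≤ k (else an
-- IndexError/ValueError on the empty dp rows), n entries in a and in d, and for n = 0
-- also k = 0 (dp[1][i] raises IndexError when n = 0 < 1 ≤ k).
def Pre_a2 (n : Int) (l : Int) (k : Int) (a : List Int) (d : List Int) : Prop :=
  0 ≤ n ∧ 0 ≤ k ∧ n ≤ a.length ∧ n ≤ d.length ∧ (n = 0 → k = 0)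
instance (n : Int) (l : Int) (k : Int) (a : List Int) (d : List Int) : Decidable (Pre_a2 n l k a d) := by unfold Pre_a2; infer_instance

def pvWitness_a2 : Int × Int × Int × List Int × List Int := (3, 10, 1, [2, 3, 4], [0, 2, 5])

def Spec_a2 (n : Int) (l : Int) (k : Int) (a : List Int) (d : List Int) (out : Int) : Prop := out = a2_alt n l k a d
instance (n : Int) (l : Int) (k : Int) (a : List Int) (d : List Int) (out : Int) : Decidable (Spec_a2 n l k a d out) := by unfold Spec_a2; infer_instance

-- ===== CLAIM (what is proved, stated in full; the proofs are below) =====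
def Claim_equal_a2 : Prop := ∀ (n : Int) (l : Int) (k : Int) (a : List Int) (d : List Int), Dom_a2 n l k a d → Pre_a2 n l k a d → Spec_a2 n l k a d (a2 n l k a d)

-- ===== LEMMAS AND PROOFS =====

-- Reference recurrence for the dp cells: pvR aF sF i j = dp[i][j].
def pvCell' (prev : Nat → Int × Int) (ai si : Int) : Nat → Int × Int
  | 0 => (ai * si + (prev 0).1, ai)
  | j + 1 =>
    let p := prev j
    let v1 := p.1 + p.2 * si
    let v2 := (prev (j + 1)).1 + ai * si
    if v1 ≤ v2 then (v1, p.2) else (v2, ai)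

def pvR (aF sF : Nat → Int) : Nat → Nat → Int × Int
  | 0, _ => (0, 0)
  | 1, _ => (aF 0 * sF 0, aF 0)
  | (i + 2), j => pvCell' (pvR aF sF (i + 1)) (aF (i + 1)) (sF (i + 1)) j

theorem pvR_zero (aF sF : Nat → Int) (i : Nat) :
    pvR aF sF (i + 1) 0 = (aF i * sF i + (pvR aF sF i 0).1, aF i) := by
  cases i with
  | zero => simp [pvR]
  | succ i => rfl

-- ---------- A side: the table loops compute pvR ----------

theorem pvLoop1 (a dd : List Int) (m : Nat) (i j : Nat) :
    ((PySem.List.pyRange 1 ((m : Int) + 1) 1).foldl (pvStep1 a dd) ⟨fun _ _ => ((0 : Int), (0 : Int))⟩).get i j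
      = if j = 0 ∧ i ≤ m then pvR (fun u => a.getD u 0) (fun u => dd.getD u 0) i 0 else (0, 0) := by
  induction m generalizing i j with
  | zero =>
    rw [PySem.List.pyRange_one_eq_nil (by omega)]
    simp only [List.foldl_nil]
    split_ifs with h
    · obtain ⟨rfl, hi⟩ := h
      have hi0 : i = 0 := by omega
      subst hi0
      simp [pvR]
    · rfl
  | succ m ih =>
    have hcast : ((m + 1 : Nat) : Int) + 1 = ((m : Int) + 1) + 1 := by push_cast; ring
    rw [hcast, PySem.List.pyRange_one_succ_right (by omega), List.foldl_append]
    simp only [List.foldl_cons, List.foldl_nil, pvStep1, pvUpd]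
    have ht : ((m : Int) + 1).toNat = m + 1 := by omega
    rw [ht]
    simp only [Nat.add_sub_cancel]
    rw [ih m 0, if_pos (show (0 : Nat) = 0 ∧ m ≤ m from ⟨rfl, le_rfl⟩)]
    by_cases h1 : i = m + 1 ∧ j = 0
    · obtain ⟨rfl, rfl⟩ := h1
      rw [if_pos ⟨rfl, rfl⟩, if_pos ⟨rfl, by omega⟩]
      exact (pvR_zero (fun u => a.getD u 0) (fun u => dd.getD u 0) m).symm
    · rw [if_neg h1, ih i j]
      by_cases h2 : j = 0 ∧ i ≤ m
      · rw [if_pos h2, if_pos ⟨h2.1, by omega⟩]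
      · rw [if_neg h2, if_neg (by omega)]

theorem pvLoop2 (a dd : List Int) (n' : Nat) (hn : 1 ≤ n') (t : Nat)
    (T : PvTbl)
    (hT : ∀ i j, T.get i j = if j = 0 ∧ i ≤ n' then pvR (fun u => a.getD u 0) (fun u => dd.getD u 0) i 0 else (0, 0))
    (i j : Nat) :
    ((PySem.List.pyRange 1 ((t : Int) + 1) 1).foldl (pvStep2 a) T).get i j
      = if j = 0 ∧ i ≤ n' then pvR (fun u => a.getD u 0) (fun u => dd.getD u 0) i 0
        else if i = 1 ∧ 1 ≤ j ∧ j ≤ t then pvR (fun u => a.getD u 0) (fun u => dd.getD u 0) 1 0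
        else (0, 0) := by
  induction t generalizing i j with
  | zero =>
    rw [PySem.List.pyRange_one_eq_nil (by omega)]
    simp only [List.foldl_nil]
    rw [hT i j]
    split_ifs with h1 h2
    · rfl
    · omega
    · rfl
  | succ t ih =>
    have hcast : ((t + 1 : Nat) : Int) + 1 = ((t : Int) + 1) + 1 := by push_cast; ring
    rw [hcast, PySem.List.pyRange_one_succ_right (by omega), List.foldl_append]
    simp only [List.foldl_cons, List.foldl_nil, pvStep2, pvUpd]
    have ht : ((t : Int) + 1).toNat = t + 1 := by omega
    rw [ht]
    rw [ih 1 0, if_pos (show (0 : Nat) = 0 ∧ 1 ≤ n' from ⟨rfl, hn⟩)]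
    have hv : ((pvR (fun u => a.getD u 0) (fun u => dd.getD u 0) 1 0).1, a.getD 0 0)
        = pvR (fun u => a.getD u 0) (fun u => dd.getD u 0) 1 0 := rfl
    rw [hv]
    by_cases h1 : i = 1 ∧ j = t + 1
    · obtain ⟨rfl, rfl⟩ := h1
      rw [if_pos ⟨rfl, rfl⟩, if_neg (by omega), if_pos ⟨rfl, by omega, le_rfl⟩]
    · rw [if_neg h1, ih i j]
      split_ifs with g1 g2 g2 g3 <;> first | rfl | omega

theorem pvLoop3i (a dd : List Int) (i' : Nat) (hi : 2 ≤ i') (k' : Nat)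
    (T : PvTbl)
    (hrow : ∀ j, j ≤ k' → T.get (i' - 1) j = pvR (fun u => a.getD u 0) (fun u => dd.getD u 0) (i' - 1) j) :
    ∀ t, t ≤ k' → ∀ i j,
    ((PySem.List.pyRange 1 ((t : Int) + 1) 1).foldl (pvStep3 a dd ((i' : Nat) : Int)) T).get i j
      = if i = i' ∧ 1 ≤ j ∧ j ≤ t then pvR (fun u => a.getD u 0) (fun u => dd.getD u 0) i' j
        else T.get i j := by
  intro t
  induction t with
  | zero =>
    intro _ i j
    rw [PySem.List.pyRange_one_eq_nil (by omega)]
    simp only [List.foldl_nil]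
    split_ifs with h
    · omega
    · rfl
  | succ t ih =>
    intro ht i j
    have ht' : t ≤ k' := by omega
    have hcast : ((t + 1 : Nat) : Int) + 1 = ((t : Int) + 1) + 1 := by push_cast; ring
    rw [hcast, PySem.List.pyRange_one_succ_right (by omega), List.foldl_append]
    simp only [List.foldl_cons, List.foldl_nil]
    have e1 : ((PySem.List.pyRange 1 ((t : Int) + 1) 1).foldl (pvStep3 a dd ((i' : Nat) : Int)) T).get (i' - 1) t
        = pvR (fun u => a.getD u 0) (fun u => dd.getD u 0) (i' - 1) t := by
      rw [ih ht' (i' - 1) t, if_neg (by omega), hrow t (by omega)]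
    have e2 : ((PySem.List.pyRange 1 ((t : Int) + 1) 1).foldl (pvStep3 a dd ((i' : Nat) : Int)) T).get (i' - 1) (t + 1)
        = pvR (fun u => a.getD u 0) (fun u => dd.getD u 0) (i' - 1) (t + 1) := by
      rw [ih ht' (i' - 1) (t + 1), if_neg (by omega), hrow (t + 1) ht]
    simp only [pvStep3, pvUpd, apply_ite PvTbl.get, ite_apply]
    have hti : ((i' : Nat) : Int).toNat = i' := by omega
    have htj : ((t : Int) + 1).toNat = t + 1 := by omega
    rw [hti, htj]
    simp only [Nat.add_sub_cancel]
    rw [e1, e2]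
    by_cases hit : i = i' ∧ j = t + 1
    · obtain ⟨h1, rfl⟩ := hit
      rw [if_pos (show i = i' ∧ t + 1 = t + 1 from ⟨h1, rfl⟩),
        if_pos (show i = i' ∧ t + 1 = t + 1 from ⟨h1, rfl⟩),
        if_pos (show i = i' ∧ 1 ≤ t + 1 ∧ t + 1 ≤ t + 1 from ⟨h1, by omega, le_rfl⟩)]
      obtain ⟨i'', rfl⟩ : ∃ i'', i' = i'' + 2 := ⟨i' - 2, by omega⟩
      have hidx : i'' + 2 - 1 = i'' + 1 := by omega
      rw [hidx]
      show _ = pvCell' (pvR (fun u => a.getD u 0) (fun u => dd.getD u 0) (i'' + 1))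
        (a.getD (i'' + 1) 0) (dd.getD (i'' + 1) 0) (t + 1)
      simp only [pvCell']
    · rw [if_neg hit, if_neg hit, ite_self, ih ht' i j]
      split_ifs with g1 g2 g2 <;> first | rfl | omega

theorem pvLoop3o (a dd : List Int) (n' k' : Nat) (_hn : 1 ≤ n')
    (T2 : PvTbl)
    (hT2 : ∀ i j, T2.get i j
      = if j = 0 ∧ i ≤ n' then pvR (fun u => a.getD u 0) (fun u => dd.getD u 0) i 0
        else if i = 1 ∧ 1 ≤ j ∧ j ≤ k' then pvR (fun u => a.getD u 0) (fun u => dd.getD u 0) 1 0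
        else (0, 0)) :
    ∀ m, m + 1 ≤ n' → ∀ i j,
    ((PySem.List.pyRange 2 ((m : Int) + 2) 1).foldl
        (fun T ii => (PySem.List.pyRange 1 ((k' : Int) + 1) 1).foldl (pvStep3 a dd ii) T) T2).get i j
      = if 2 ≤ i ∧ i ≤ m + 1 ∧ 1 ≤ j ∧ j ≤ k' then pvR (fun u => a.getD u 0) (fun u => dd.getD u 0) i j
        else T2.get i j := by
  intro m
  induction m with
  | zero =>
    intro _ i j
    rw [show PySem.List.pyRange 2 (((0 : Nat) : Int) + 2) 1 = [] from
      PySem.List.pyRange_one_eq_nil (by omega)]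
    simp only [List.foldl_nil]
    split_ifs with h
    · omega
    · rfl
  | succ m ih =>
    intro hm i j
    have hm' : m + 1 ≤ n' := by omega
    have hcast : ((m + 1 : Nat) : Int) + 2 = ((m : Int) + 2) + 1 := by push_cast; ring
    have hpeel : PySem.List.pyRange 2 (((m : Int) + 2) + 1) 1
        = PySem.List.pyRange 2 ((m : Int) + 2) 1 ++ [(m : Int) + 2] :=
      PySem.List.pyRange_one_succ_right (by omega)
    rw [hcast, hpeel, List.foldl_append]
    simp only [List.foldl_cons, List.foldl_nil]
    have hii : ((m : Int) + 2) = ((m + 2 : Nat) : Int) := by push_cast; ring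
    rw [hii]
    have hrow : ∀ jj, jj ≤ k' →
        ((PySem.List.pyRange 2 (((m + 2 : Nat)) : Int) 1).foldl
          (fun T ii => (PySem.List.pyRange 1 ((k' : Int) + 1) 1).foldl (pvStep3 a dd ii) T) T2).get
          (m + 2 - 1) jj
        = pvR (fun u => a.getD u 0) (fun u => dd.getD u 0) (m + 2 - 1) jj := by
      intro jj hjj
      rw [← hii, ih hm' (m + 2 - 1) jj]
      rcases Nat.eq_zero_or_pos jj with hjj0 | hjj1
      · subst hjj0
        rw [if_neg (by omega), hT2, if_pos ⟨rfl, by omega⟩]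
      · rcases Nat.lt_or_ge m 1 with hm0 | hm1
        · have hm00 : m = 0 := by omega
          subst hm00
          rw [if_neg (by omega), hT2, if_neg (by omega), if_pos ⟨rfl, by omega, hjj⟩]
          rfl
        · rw [if_pos ⟨by omega, by omega, by omega, hjj⟩]
    rw [pvLoop3i a dd (m + 2) (by omega) k' _ hrow k' le_rfl i j, ← hii, ih hm' i j]
    by_cases hA : i = m + 2 ∧ 1 ≤ j ∧ j ≤ k'
    · rw [if_pos hA, if_pos (show 2 ≤ i ∧ i ≤ m + 1 + 1 ∧ 1 ≤ j ∧ j ≤ k' by omega), hA.1]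
    · rw [if_neg hA]
      split_ifs with g1 g2 g2 <;> first | rfl | omega

theorem a2_eq_minRow (n l k : Int) (a d : List Int) (hn : 1 ≤ n) (hk : 0 ≤ k) :
    a2 n l k a d =
      (pvMinRow ((PySem.List.pyRange 0 (k + 1) 1).map
        (fun j => pvR (fun u => a.getD u 0) (fun u => (pvSeg n l d).getD u 0) n.toNat j.toNat))).1 := by
  obtain ⟨N, rfl⟩ : ∃ N : Nat, n = (N : Int) := ⟨n.toNat, by omega⟩
  obtain ⟨K, rfl⟩ : ∃ K : Nat, k = (K : Int) := ⟨k.toNat, by omega⟩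
  have hN : 1 ≤ N := by omega
  simp only [a2, Int.toNat_natCast]
  set dd := pvSeg (N : Int) l d with hdd
  have h1 := pvLoop1 a dd N
  have h2 := pvLoop2 a dd N hN K _ h1
  have h3 := pvLoop3o a dd N K hN _ h2 (N - 1) (by omega)
  have hcast : ((N : Nat) : Int) + 1 = ((N - 1 : Nat) : Int) + 2 := by omega
  rw [← hcast] at h3
  congr 1
  congr 1
  apply List.map_congr_left
  intro j hjm
  have hj : 0 ≤ j ∧ j < (K : Int) + 1 := (PySem.List.mem_pyRange_one).mp hjm
  have hjK : j.toNat ≤ K := by omega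
  rw [h3 N j.toNat]
  rcases Nat.eq_zero_or_pos j.toNat with hj0 | hj1
  · rw [hj0, if_neg (by omega), h2, if_pos ⟨rfl, le_rfl⟩]
  · rcases Nat.lt_or_ge N 2 with hN1 | hN2
    · have hN11 : N = 1 := by omega
      subst hN11
      rw [if_neg (by omega), h2, if_neg (by omega), if_pos ⟨rfl, by omega, hjK⟩]
      rfl
    · rw [if_pos ⟨hN2, by omega, by omega, hjK⟩]

-- ---------- B side: the stack machine computes pvR ----------

-- dp-cell value named by a stack entry
def pvRI (a seg : List Int) (c : Int × Int) : Int × Int :=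
  pvR (fun u => a.getD u 0) (fun u => seg.getD u 0) c.1.toNat c.2.toNat

-- every memoised value is the dp value of its cell
def pvMinv (a seg : List Int) (m : PySem.Dict (Int × Int) (Int × Int)) : Prop :=
  ∀ c v, PySem.Dict.get? m c = some v → v = pvRI a seg c

-- DFS order rank: a cell waiting on the stack only has strictly smaller-rank cells above it
def pvRank (c : Int × Int) : Int := 2 * c.1 + (if c.2 = 0 then 0 else 1)

theorem pvKids_rank (c : Int × Int) (hi : 0 < c.1) :
    ∀ x ∈ pvKids c, pvRank x < pvRank c := by
  intro x hx
  simp only [pvKids] at hx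
  split_ifs at hx with h1 h2 <;> simp at hx <;>
    [skip; skip; rcases hx with rfl | rfl] <;> (try subst hx) <;> simp [pvRank] <;> split_ifs <;> omega

-- cell c is waiting on stack s with exactly pre above (its topmost waiting occurrence)
def pvPending (s : List (Int × Int)) (m : PySem.Dict (Int × Int) (Int × Int))
    (e : PySem.Set (Int × Int)) (c : Int × Int) (pre : List (Int × Int)) : Prop :=
  (∃ suf, s = pre ++ c :: suf) ∧ PySem.Set.contains e c = true ∧
    PySem.Dict.get? m c = none ∧ c ∉ pre

-- the DFS invariant of the stack loop
def pvGood (s : List (Int × Int)) (m : PySem.Dict (Int × Int) (Int × Int))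
    (e : PySem.Set (Int × Int)) : Prop :=
  (∀ c pre, pvPending s m e c pre →
      (∀ x ∈ pvKids c, (PySem.Dict.get? m x).isSome ∨ x ∈ pre) ∧
      (∀ x ∈ pre, pvRank x < pvRank c)) ∧
  (∀ c, PySem.Set.contains e c = true → PySem.Dict.get? m c = none → c ∈ s)

theorem pvPending_cons {x : Int × Int} {s : List (Int × Int)} {m e c pre}
    (h : pvPending (x :: s) m e c pre) :
    (pre = [] ∧ c = x) ∨
      (∃ pre₂, pre = x :: pre₂ ∧ c ≠ x ∧ pvPending s m e c pre₂) := by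
  obtain ⟨⟨suf, heq⟩, hc, hm, hnp⟩ := h
  cases pre with
  | nil =>
    left
    simp only [List.nil_append, List.cons.injEq] at heq
    exact ⟨rfl, heq.1.symm⟩
  | cons p pre₂ =>
    right
    simp only [List.cons_append, List.cons.injEq] at heq
    refine ⟨pre₂, by rw [heq.1], ?_, ⟨suf, heq.2⟩, hc, hm, fun h => hnp (List.mem_cons_of_mem _ h)⟩
    intro hcx
    exact hnp (by simp [heq.1, hcx])

theorem pvPending_cons_of {x : Int × Int} {s : List (Int × Int)} {m e c pre}
    (hne : c ≠ x) (h : pvPending s m e c pre) : pvPending (x :: s) m e c (x :: pre) := by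
  obtain ⟨⟨suf, heq⟩, hc, hm, hnp⟩ := h
  exact ⟨⟨suf, by simp [heq]⟩, hc, hm, by simp [hne, hnp]⟩

theorem pv_mem_first_split {α : Type} {x : α} {l : List α} (h : x ∈ l) :
    ∃ pre suf, l = pre ++ x :: suf ∧ x ∉ pre := by
  induction l with
  | nil => simp at h
  | cons y t ih =>
    by_cases hxy : x = y
    · exact ⟨[], t, by simp [hxy], by simp⟩
    · rcases ih ((List.mem_cons.mp h).resolve_left hxy) with
        ⟨pre, suf, heq, hnp⟩
      exact ⟨y :: pre, suf, by simp [heq], by simp [hxy, hnp]⟩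

theorem pvPending_append {ks s : List (Int × Int)} {m e c pre}
    (h : pvPending (ks ++ s) m e c pre) :
    c ∈ ks ∨ (∃ pre₂, pre = ks ++ pre₂ ∧ c ∉ ks ∧ pvPending s m e c pre₂) := by
  induction ks generalizing pre with
  | nil => exact Or.inr ⟨pre, rfl, by simp, h⟩
  | cons x t ih =>
    rcases pvPending_cons h with ⟨rfl, rfl⟩ | ⟨pre₂, rfl, hne, h₂⟩
    · exact Or.inl List.mem_cons_self
    · rcases ih h₂ with h | ⟨pre₃, rfl, hnm, h₃⟩
      · exact Or.inl (List.mem_cons_of_mem _ h)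
      · exact Or.inr ⟨pre₃, by simp, by simp [hne, hnm], h₃⟩

-- the value computed in the expanded branch is the dp value, given the kids' values
theorem pvVal_correct (a seg : List Int) (m : PySem.Dict (Int × Int) (Int × Int))
    (hM : pvMinv a seg m) (c : Int × Int) (hc1 : 0 < c.1) (hc2 : 0 ≤ c.2)
    (hkids : ∀ x ∈ pvKids c, (PySem.Dict.get? m x).isSome) :
    (if c.2 = 0 then
        (a.getD (c.1 - 1).toNat 0 * seg.getD (c.1 - 1).toNat 0 +
          ((PySem.Dict.get? m (c.1 - 1, 0)).getD (0, 0)).1, a.getD (c.1 - 1).toNat 0)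
      else if c.1 = 1 then
        (((PySem.Dict.get? m (1, 0)).getD (0, 0)).1, a.getD 0 0)
      else
        let p := (PySem.Dict.get? m (c.1 - 1, c.2 - 1)).getD (0, 0)
        let v1 := p.1 + p.2 * seg.getD (c.1 - 1).toNat 0
        let v2 := ((PySem.Dict.get? m (c.1 - 1, c.2)).getD (0, 0)).1 +
          a.getD (c.1 - 1).toNat 0 * seg.getD (c.1 - 1).toNat 0
        if v1 ≤ v2 then (v1, p.2) else (v2, a.getD (c.1 - 1).toNat 0)) = pvRI a seg c := by
  have hg : ∀ x ∈ pvKids c, (PySem.Dict.get? m x).getD (0, 0) = pvRI a seg x := by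
    intro x hx
    rcases Option.isSome_iff_exists.mp (hkids x hx) with ⟨v, hv⟩
    rw [hv, Option.getD_some, hM x v hv]
  rcases c with ⟨i, j⟩
  simp only at hc1 hc2 ⊢
  by_cases hj0 : j = 0
  · subst hj0
    rw [if_pos rfl, hg (i - 1, 0) (by simp [pvKids])]
    simp only [pvRI]
    have hi' : i.toNat = (i - 1).toNat + 1 := by omega
    simp only [Int.toNat_zero]
    rw [hi', pvR_zero]
  · rw [if_neg hj0]
    by_cases hi1 : i = 1
    · subst hi1
      rw [if_pos rfl, hg (1, 0) (by simp [pvKids, hj0])]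
      simp only [pvRI]
      have hj' : ∃ u, j.toNat = u + 1 := ⟨j.toNat - 1, by omega⟩
      rcases hj' with ⟨u, hu⟩
      rw [hu]
      rfl
    · rw [if_neg hi1]
      rw [hg (i - 1, j - 1) (by simp [pvKids, hj0, hi1]),
        hg (i - 1, j) (by simp [pvKids, hj0, hi1])]
      simp only [pvRI]
      have ht : ∃ t, i.toNat = t + 2 := ⟨i.toNat - 2, by omega⟩
      have hu : ∃ u, j.toNat = u + 1 := ⟨j.toNat - 1, by omega⟩
      rcases ht with ⟨t, ht⟩
      rcases hu with ⟨u, hu⟩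
      have h1 : (i - 1).toNat = t + 1 := by omega
      have h2 : (j - 1).toNat = u := by omega
      rw [ht, hu, h1, h2]
      show _ = pvCell' (pvR (fun u => a.getD u 0) (fun u => seg.getD u 0) (t + 1))
        (a.getD (t + 1) 0) (seg.getD (t + 1) 0) (u + 1)
      simp only [pvCell']

theorem pv_get?_insert_isSome {m : PySem.Dict (Int × Int) (Int × Int)} {c x : Int × Int}
    {v : Int × Int} (h : (PySem.Dict.get? m x).isSome) :
    (PySem.Dict.get? (PySem.Dict.insert m c v) x).isSome := by
  by_cases hx : x = c
  · subst hx; rw [PySem.Dict.get?_insert_self]; rfl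
  · rwa [PySem.Dict.get?_insert_of_ne _ _ hx]

theorem pvGood_tail_mem {c : Int × Int} {rest : List (Int × Int)}
    {m : PySem.Dict (Int × Int) (Int × Int)} {e : PySem.Set (Int × Int)}
    (hG : pvGood (c :: rest) m e) (hm : (PySem.Dict.get? m c).isSome) : pvGood rest m e := by
  constructor
  · intro c' pre' hp
    have hne : c' ≠ c := by
      intro h; subst h; rw [hp.2.2.1] at hm; cases hm
    have := hG.1 c' (c :: pre') (pvPending_cons_of hne hp)
    refine ⟨fun x hx => ?_, fun x hx => this.2 x (List.mem_cons_of_mem _ hx)⟩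
    rcases this.1 x hx with h | h
    · exact Or.inl h
    · rcases List.mem_cons.mp h with rfl | h
      · exact Or.inl hm
      · exact Or.inr h
  · intro c' hc' hm'
    have hne : c' ≠ c := by intro h; subst h; rw [hm'] at hm; cases hm
    rcases List.mem_cons.mp (hG.2 c' hc' hm') with h | h
    · exact absurd h hne
    · exact h

theorem pvGood_tail_insert {c : Int × Int} {rest : List (Int × Int)}
    {m : PySem.Dict (Int × Int) (Int × Int)} {e : PySem.Set (Int × Int)} {v : Int × Int}
    (hG : pvGood (c :: rest) m e) : pvGood rest (PySem.Dict.insert m c v) e := by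
  constructor
  · intro c' pre' hp
    obtain ⟨⟨suf, heq⟩, hc', hm', hnp⟩ := hp
    have hne : c' ≠ c := by
      intro h; subst h; rw [PySem.Dict.get?_insert_self] at hm'; cases hm'
    have hmold : PySem.Dict.get? m c' = none := by
      rwa [PySem.Dict.get?_insert_of_ne _ _ hne] at hm'
    have := hG.1 c' (c :: pre') (pvPending_cons_of hne ⟨⟨suf, heq⟩, hc', hmold, hnp⟩)
    refine ⟨fun x hx => ?_, fun x hx => this.2 x (List.mem_cons_of_mem _ hx)⟩
    rcases this.1 x hx with h | h
    · exact Or.inl (pv_get?_insert_isSome h)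
    · rcases List.mem_cons.mp h with rfl | h
      · exact Or.inl (by rw [PySem.Dict.get?_insert_self]; rfl)
      · exact Or.inr h
  · intro c' hc' hm'
    have hne : c' ≠ c := by
      intro h; subst h; rw [PySem.Dict.get?_insert_self] at hm'; cases hm'
    have hmold : PySem.Dict.get? m c' = none := by
      rwa [PySem.Dict.get?_insert_of_ne _ _ hne] at hm'
    rcases List.mem_cons.mp (hG.2 c' hc' hmold) with h | h
    · exact absurd h hne
    · exact h

theorem pvGood_push {c : Int × Int} {rest : List (Int × Int)}
    {m : PySem.Dict (Int × Int) (Int × Int)} {e : PySem.Set (Int × Int)}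
    (hG : pvGood (c :: rest) m e) (hm : PySem.Dict.get? m c = none)
    (he : ¬ PySem.Set.contains e c = true) (hi : 0 < c.1) :
    pvGood (pvKids c ++ c :: rest) m (PySem.Set.add e c) := by
  have hcontains : ∀ x : Int × Int, PySem.Set.contains (PySem.Set.add e c) x = true ↔
      (PySem.Set.contains e x = true ∨ x = c) := by
    intro x
    rw [PySem.Set.contains_iff, PySem.Set.contains_iff, PySem.Set.mem_add]
  -- a freshly pushed kid is never itself waiting on the stack
  have hnokid : ∀ x ∈ pvKids c, ¬ (PySem.Set.contains e x = true ∧ PySem.Dict.get? m x = none) := by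
    intro x hx ⟨hxe, hxm⟩
    have hxc : x ≠ c := by
      intro h; rw [h] at hx; exact absurd rfl (ne_of_lt (pvKids_rank c hi c hx))
    rcases List.mem_cons.mp (hG.2 x hxe hxm) with h | h
    · exact absurd h hxc
    · rcases pv_mem_first_split h with ⟨pre, suf, heq, hnp⟩
      have hp : pvPending (c :: rest) m e x (c :: pre) :=
        ⟨⟨suf, by simp [heq]⟩, hxe, hxm, by simp [hxc, hnp]⟩
      have := (hG.1 x (c :: pre) hp).2 c List.mem_cons_self
      exact absurd (pvKids_rank c hi x hx) (by omega)
  constructor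
  · intro c' pre' hp
    have hc'e : PySem.Set.contains e c' = true ∨ c' = c := (hcontains c').mp hp.2.1
    rcases pvPending_append hp with hmemk | ⟨pre₂, rfl, hnk, hp₂⟩
    · -- c' is a pushed kid: impossible
      have hc'c : c' ≠ c := by
        intro h; rw [h] at hmemk; exact absurd rfl (ne_of_lt (pvKids_rank c hi c hmemk))
      have hc'e' : PySem.Set.contains e c' = true := hc'e.resolve_right hc'c
      exact absurd ⟨hc'e', hp.2.2.1⟩ (hnokid c' hmemk)
    · rcases pvPending_cons hp₂ with ⟨rfl, rfl⟩ | ⟨pre₃, rfl, hne, hp₃⟩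
      · -- c' = c, pre' = kids: the freshly expanded cell
        refine ⟨fun x hx => Or.inr (by simp [hx]), fun x hx => ?_⟩
        simp only [List.append_nil] at hx
        exact pvKids_rank c' hi x hx
      · -- an older waiting cell
        have hc'e' : PySem.Set.contains e c' = true := hc'e.resolve_right hne
        obtain ⟨⟨suf, heq⟩, _, hm', hnp⟩ := hp₃
        have hpold : pvPending (c :: rest) m e c' (c :: pre₃) :=
          ⟨⟨suf, by simp [heq]⟩, hc'e', hm', by simp [hne, hnp]⟩
        have hold := hG.1 c' (c :: pre₃) hpold
        have hrc : pvRank c < pvRank c' := hold.2 c List.mem_cons_self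
        refine ⟨fun x hx => ?_, fun x hx => ?_⟩
        · rcases hold.1 x hx with h | h
          · exact Or.inl h
          · exact Or.inr (by simp [h])
        · rcases List.mem_append.mp hx with h | h
          · exact lt_trans (pvKids_rank c hi x h) hrc
          · exact hold.2 x h
  · intro c' hc' hm'
    rcases (hcontains c').mp hc' with h | rfl
    · exact List.mem_append.mpr (Or.inr (hG.2 c' h hm'))
    · exact List.mem_append.mpr (Or.inr List.mem_cons_self)

-- the stack loop: memo stays correct, only grows, and absorbs the whole stack
theorem pvCellLoop_spec (n k : Int) (a seg : List Int) :
    ∀ (stack : List (Int × Int)) (hs : ∀ c ∈ stack, pvInU n k c = true)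
      (m : PySem.Dict (Int × Int) (Int × Int)) (e : PySem.Set (Int × Int)),
      pvMinv a seg m → pvGood stack m e →
      pvMinv a seg (pvCellLoop n k a seg stack hs m e).1 ∧
      (∀ c, (PySem.Dict.get? m c).isSome →
        (PySem.Dict.get? (pvCellLoop n k a seg stack hs m e).1 c).isSome) ∧
      (∀ c ∈ stack, (PySem.Dict.get? (pvCellLoop n k a seg stack hs m e).1 c).isSome) ∧
      (∀ c, PySem.Set.contains (pvCellLoop n k a seg stack hs m e).2 c = true →
        (PySem.Dict.get? (pvCellLoop n k a seg stack hs m e).1 c).isSome) := by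
  intro stack hs m e
  induction stack, hs, m, e using pvCellLoop.induct n k a seg with
  | case1 hs m e _ =>
    intro hM hG
    simp only [pvCellLoop]
    refine ⟨hM, fun c h => h, by simp, fun c hc => ?_⟩
    rcases hopt : PySem.Dict.get? m c with _ | v
    · exact absurd (hG.2 c hc hopt) (by simp)
    · rfl
  | case2 c rest hs m e hm _ ih =>
    intro hM hG
    simp only [pvCellLoop, dif_pos hm]
    obtain ⟨i1, i2, i3, i4⟩ := ih hM (pvGood_tail_mem hG hm)
    refine ⟨i1, i2, fun x hx => ?_, i4⟩
    rcases List.mem_cons.mp hx with rfl | hx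
    · exact i2 x hm
    · exact i3 x hx
  | case3 c rest hs m e hm hi _ ih =>
    intro hM hG
    simp only [pvCellLoop, dif_neg hm, dif_pos hi]
    have hM' : pvMinv a seg (PySem.Dict.insert m c (0, 0)) := by
      intro c' v hv
      by_cases hc : c' = c
      · subst hc
        rw [PySem.Dict.get?_insert_self] at hv
        cases hv
        have h0 : c'.1.toNat = 0 := by omega
        simp only [pvRI, h0]
        rfl
      · exact hM c' v (by rwa [PySem.Dict.get?_insert_of_ne _ _ hc] at hv)
    obtain ⟨i1, i2, i3, i4⟩ := ih hM' (pvGood_tail_insert hG)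
    refine ⟨i1, fun x hx => i2 x (pv_get?_insert_isSome hx), fun x hx => ?_, i4⟩
    rcases List.mem_cons.mp hx with rfl | hx
    · exact i2 x (by rw [PySem.Dict.get?_insert_self]; rfl)
    · exact i3 x hx
  | case4 c rest hs m e hm hi he i j val _ ih =>
    intro hM hG
    simp only [pvCellLoop, dif_neg hm, dif_neg hi, dif_pos he]
    have hnone : PySem.Dict.get? m c = none := Option.not_isSome_iff_eq_none.mp hm
    have hkids : ∀ x ∈ pvKids c, (PySem.Dict.get? m x).isSome := by
      intro x hx
      have hp : pvPending (c :: rest) m e c [] := ⟨⟨rest, rfl⟩, he, hnone, by simp⟩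
      rcases (hG.1 c [] hp).1 x hx with h | h
      · exact h
      · simp at h
    have hc2 : 0 ≤ c.2 := by
      have := hs c List.mem_cons_self
      simp only [pvInU, Bool.and_eq_true, decide_eq_true_eq] at this
      omega
    have hval := pvVal_correct a seg m hM c (by omega) hc2 hkids
    have hM' : pvMinv a seg (PySem.Dict.insert m c
        (if c.2 = 0 then
          (a.getD (c.1 - 1).toNat 0 * seg.getD (c.1 - 1).toNat 0 +
            ((PySem.Dict.get? m (c.1 - 1, 0)).getD (0, 0)).1, a.getD (c.1 - 1).toNat 0)
        else if c.1 = 1 then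
          (((PySem.Dict.get? m (1, 0)).getD (0, 0)).1, a.getD 0 0)
        else
          let p := (PySem.Dict.get? m (c.1 - 1, c.2 - 1)).getD (0, 0)
          let v1 := p.1 + p.2 * seg.getD (c.1 - 1).toNat 0
          let v2 := ((PySem.Dict.get? m (c.1 - 1, c.2)).getD (0, 0)).1 +
            a.getD (c.1 - 1).toNat 0 * seg.getD (c.1 - 1).toNat 0
          if v1 ≤ v2 then (v1, p.2) else (v2, a.getD (c.1 - 1).toNat 0))) := by
      intro c' v hv
      by_cases hc : c' = c
      · subst hc
        rw [PySem.Dict.get?_insert_self] at hv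
        cases hv
        exact hval
      · exact hM c' v (by rwa [PySem.Dict.get?_insert_of_ne _ _ hc] at hv)
    obtain ⟨i1, i2, i3, i4⟩ := ih hM' (pvGood_tail_insert hG)
    refine ⟨i1, fun x hx => i2 x (pv_get?_insert_isSome hx), fun x hx => ?_, i4⟩
    rcases List.mem_cons.mp hx with rfl | hx
    · exact i2 x (by rw [PySem.Dict.get?_insert_self]; rfl)
    · exact i3 x hx
  | case5 c rest hs m e hm hi he _ ih =>
    intro hM hG
    simp only [pvCellLoop, dif_neg hm, dif_neg hi, dif_neg he]
    have hnone : PySem.Dict.get? m c = none := Option.not_isSome_iff_eq_none.mp hm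
    obtain ⟨i1, i2, i3, i4⟩ := ih hM (pvGood_push hG hnone he (by omega))
    refine ⟨i1, i2, fun x hx => i3 x (List.mem_append.mpr (Or.inr hx)), i4⟩

theorem pvGood_singleton {c : Int × Int} {m : PySem.Dict (Int × Int) (Int × Int)}
    {e : PySem.Set (Int × Int)}
    (hclean : ∀ x, PySem.Set.contains e x = true → (PySem.Dict.get? m x).isSome) :
    pvGood [c] m e := by
  constructor
  · intro c' pre hp
    obtain ⟨⟨suf, heq⟩, hc', hm', _⟩ := hp
    have := hclean c' hc'
    rw [hm'] at this
    cases this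
  · intro c' hc' hm'
    have := hclean c' hc'
    rw [hm'] at this
    cases this

theorem pvMinRow_append_singleton (xs : List (Int × Int)) (hne : xs ≠ []) (x : Int × Int) :
    pvMinRow (xs ++ [x]) = if pvLexLt x (pvMinRow xs) then x else pvMinRow xs := by
  cases xs with
  | nil => exact absurd rfl hne
  | cons h t =>
    show pvMinRow (h :: (t ++ [x])) = _
    simp only [pvMinRow, List.foldl_append, List.foldl_cons, List.foldl_nil]

-- the body of the outer 'for j in range(k+1):' loop of Source B (named for the proofs only)
def pvBody (n k : Int) (a seg : List Int)
    (st : PySem.Dict (Int × Int) (Int × Int) × PySem.Set (Int × Int) × Option (Int × Int))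
    (j : Int) :
    PySem.Dict (Int × Int) (Int × Int) × PySem.Set (Int × Int) × Option (Int × Int) :=
  let r := pvCell n k a seg st.1 st.2.1 (n, j)
  let v := (PySem.Dict.get? r.1 (n, j)).getD (0, 0)
  (r.1, r.2,
    match st.2.2 with
    | none => some v
    | some b => if pvLexLt v b then some v else some b)

theorem pvBody_eq (n k : Int) (a seg : List Int)
    (st : PySem.Dict (Int × Int) (Int × Int) × PySem.Set (Int × Int) × Option (Int × Int))
    (j : Int) (hu : pvInU n k (n, j) = true) :
    pvBody n k a seg st j =
      (let r := pvCellLoop n k a seg [(n, j)]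
          (fun x hx => by rw [List.mem_singleton] at hx; subst hx; exact hu) st.1 st.2.1
       let v := (PySem.Dict.get? r.1 (n, j)).getD (0, 0)
       (r.1, r.2,
         match st.2.2 with
         | none => some v
         | some b => if pvLexLt v b then some v else some b)) := by
  simp only [pvBody, pvCell]
  rw [dif_pos hu]

-- the outer loop: the running best is the first lexicographic minimum of the goal cells
theorem pvFoldLoop (n k : Int) (a seg : List Int) (hn : 0 ≤ n) (hk : 0 ≤ k) :
    ∀ t : Nat, (t : Int) ≤ k →
    pvMinv a seg ((PySem.List.pyRange 0 ((t : Int) + 1) 1).foldl (pvBody n k a seg)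
        (PySem.Dict.empty, PySem.Set.empty, none)).1 ∧
    (∀ x, PySem.Set.contains ((PySem.List.pyRange 0 ((t : Int) + 1) 1).foldl (pvBody n k a seg)
        (PySem.Dict.empty, PySem.Set.empty, none)).2.1 x = true →
      (PySem.Dict.get? ((PySem.List.pyRange 0 ((t : Int) + 1) 1).foldl (pvBody n k a seg)
        (PySem.Dict.empty, PySem.Set.empty, none)).1 x).isSome) ∧
    ((PySem.List.pyRange 0 ((t : Int) + 1) 1).foldl (pvBody n k a seg)
        (PySem.Dict.empty, PySem.Set.empty, none)).2.2
      = some (pvMinRow ((PySem.List.pyRange 0 ((t : Int) + 1) 1).map (fun j => pvRI a seg (n, j)))) := by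
  have hMempty : pvMinv a seg PySem.Dict.empty := by
    intro c v hv
    simp [PySem.Dict.get?_empty] at hv
  intro t
  induction t with
  | zero =>
    intro _
    simp only [Nat.cast_zero]
    rw [show (0 : Int) + 1 = 0 + 1 from rfl, PySem.List.pyRange_one_singleton]
    simp only [List.foldl_cons, List.foldl_nil, List.map_cons, List.map_nil]
    have hu : pvInU n k (n, 0) = true := by
      simp only [pvInU, Bool.and_eq_true, decide_eq_true_eq]
      omega
    rw [pvBody_eq n k a seg _ 0 hu]
    dsimp only
    have hclean0 : ∀ x, PySem.Set.contains (PySem.Set.empty : PySem.Set (Int × Int)) x = true →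
        (PySem.Dict.get? (PySem.Dict.empty : PySem.Dict (Int × Int) (Int × Int)) x).isSome := by
      intro x hx
      rw [PySem.Set.contains_iff] at hx
      cases hx
    have hr := pvCellLoop_spec n k a seg [(n, 0)]
      (fun x hx => by rw [List.mem_singleton] at hx; subst hx; exact hu)
      PySem.Dict.empty PySem.Set.empty hMempty (pvGood_singleton hclean0)
    obtain ⟨w, hw⟩ := Option.isSome_iff_exists.mp (hr.2.2.1 (n, 0) (List.mem_singleton_self _))
    refine ⟨hr.1, hr.2.2.2, ?_⟩
    rw [hw, Option.getD_some, hr.1 _ _ hw]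
    rfl
  | succ t ih =>
    intro hle
    have hle' : (t : Int) ≤ k := by push_cast at hle ⊢; omega
    obtain ⟨hM, hclean, hbest⟩ := ih hle'
    have hpeel : PySem.List.pyRange 0 (((t + 1 : Nat) : Int) + 1) 1
        = PySem.List.pyRange 0 ((t : Int) + 1) 1 ++ [(t : Int) + 1] := by
      have : ((t + 1 : Nat) : Int) + 1 = ((t : Int) + 1) + 1 := by push_cast; ring
      rw [this]
      exact PySem.List.pyRange_one_succ_right (by omega)
    rw [hpeel, List.foldl_append, List.map_append]
    simp only [List.foldl_cons, List.foldl_nil, List.map_cons, List.map_nil]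
    have hu : pvInU n k (n, (t : Int) + 1) = true := by
      simp only [pvInU, Bool.and_eq_true, decide_eq_true_eq]
      push_cast at hle
      omega
    rw [pvBody_eq n k a seg _ ((t : Int) + 1) hu]
    dsimp only
    have hr := pvCellLoop_spec n k a seg [(n, (t : Int) + 1)]
      (fun x hx => by rw [List.mem_singleton] at hx; subst hx; exact hu)
      _ _ hM (pvGood_singleton hclean)
    obtain ⟨w, hw⟩ := Option.isSome_iff_exists.mp
      (hr.2.2.1 (n, (t : Int) + 1) (List.mem_singleton_self _))
    refine ⟨hr.1, hr.2.2.2, ?_⟩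
    rw [hbest]
    dsimp only
    rw [hw, Option.getD_some, hr.1 _ _ hw]
    have hne : (PySem.List.pyRange 0 ((t : Int) + 1) 1).map (fun j => pvRI a seg (n, j)) ≠ [] := by
      apply List.ne_nil_of_length_pos
      simp only [List.length_map, PySem.List.length_pyRange_one]
      omega
    rw [pvMinRow_append_singleton _ hne]
    split_ifs <;> rfl

theorem a2_alt_eq (n l k : Int) (a d : List Int) (hn : 0 ≤ n) (hk : 0 ≤ k) :
    a2_alt n l k a d =
      (pvMinRow ((PySem.List.pyRange 0 (k + 1) 1).map
        (fun j => pvRI a (pvSeg n l d) (n, j)))).1 := by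
  have ha : a2_alt n l k a d =
      ((((PySem.List.pyRange 0 (k + 1) 1).foldl (pvBody n k a (pvSeg n l d))
        (PySem.Dict.empty, PySem.Set.empty, none)).2.2).getD (0, 0)).1 := rfl
  have hcast : ((k.toNat : Nat) : Int) = k := by omega
  have h := (pvFoldLoop n k a (pvSeg n l d) hn hk k.toNat (by omega)).2.2
  rw [hcast] at h
  rw [ha, h, Option.getD_some]

-- ===== VERDICT (by name: the statement is the Claim_ definition above) =====
theorem a2_spec : Claim_equal_a2 := by
  intro n l k a d _ hpre
  obtain ⟨hn, hk, _, _, hnk⟩ := hpre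
  unfold Spec_a2
  rcases lt_or_ge 0 n with hpos | hzero
  · rw [a2_eq_minRow n l k a d (by omega) hk, a2_alt_eq n l k a d (by omega) hk]
    rfl
  · have hn0 : n = 0 := le_antisymm hzero hn
    subst hn0
    have hk0 : k = 0 := hnk rfl
    subst hk0
    rw [a2_alt_eq 0 l 0 a d le_rfl le_rfl]
    rw [show (0 : Int) + 1 = 0 + 1 from rfl, PySem.List.pyRange_one_singleton]
    simp only [a2, List.map_cons, List.map_nil]
    rw [PySem.List.pyRange_one_eq_nil (by omega), PySem.List.pyRange_one_eq_nil (by omega)]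
    simp only [List.foldl_nil]
    rfl
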